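-- pv_equiv track=rewrite | github.com/mc-putchar/AoC24 | 09/solution.py | find_space
-- ===== SOURCE A (Python) =====
-- def find_space(disk, size, limit):
--     free_size = 0
--     for i in range(limit):
--         if disk[i] >= 0:
--             free_size = 0
--             continue
--         free_size += 1
--         if free_size >= size:
--             return i + 1 - free_size
--     return -1
-- ===== SOURCE B (Python) =====
-- def find_space(disk, size, limit):
--     # Backward suffix-run pass: precompute (implicitly) the length of the free
--     # run starting at each index of the prefix disk[:limit], keeping the
--     # leftmost index whose run is long enough. No early exit, opposite
--     # traversal order to a forward counter scan.
--     prefix = disk[:max(limit, 0)]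
--     best = -1
--     run = 0
--     for i in range(len(prefix) - 1, -1, -1):
--         if prefix[i] < 0:
--             run += 1
--         else:
--             run = 0
--         if prefix[i] < 0 and run >= size:
--             best = i
--     return best
-- ===== Notes on version B (the rewrite author's own statement) =====
-- stated objective: alternative
-- what changed: A's forward scan with a reset counter and early return is replaced by a full backward pass over the slice disk[:limit] that maintains the suffix free-run length at each index and keeps the leftmost index whose run reaches size.
import Mathlib
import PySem

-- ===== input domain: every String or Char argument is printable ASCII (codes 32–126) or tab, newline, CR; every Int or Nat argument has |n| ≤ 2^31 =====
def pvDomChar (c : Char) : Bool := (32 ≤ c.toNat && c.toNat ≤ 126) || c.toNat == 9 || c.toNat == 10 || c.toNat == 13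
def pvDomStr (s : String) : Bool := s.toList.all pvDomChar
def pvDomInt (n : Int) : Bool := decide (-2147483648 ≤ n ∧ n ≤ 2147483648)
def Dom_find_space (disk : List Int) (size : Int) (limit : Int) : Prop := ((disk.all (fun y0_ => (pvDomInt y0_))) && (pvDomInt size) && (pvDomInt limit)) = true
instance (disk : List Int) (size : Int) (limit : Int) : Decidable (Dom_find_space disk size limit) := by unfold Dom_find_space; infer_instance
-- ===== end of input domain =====

-- B replaces A's forward early-return scan with a reset counter by a full backward pass
-- over the slice disk[:limit] that maintains the suffix free-run length and keeps the
-- leftmost index whose run reaches size; objective: alternative (same O(limit) cost).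

-- ===== PORT A =====
-- A's for-loop over range(limit) with the running counter free_size; early return via recursion.
def find_space_go (disk : List Int) (size : Int) : List Int → Int → Int
  | [], _ => -1
  | i :: rest, free_size =>
    match PySem.List.pyGet? disk i with
    | none => 0  -- IndexError in Python; excluded by Pre_find_space
    | some v =>
      if v ≥ 0 then find_space_go disk size rest 0
      else
        let f := free_size + 1
        if f ≥ size then i + 1 - f
        else find_space_go disk size rest f

def find_space (disk : List Int) (size : Int) (limit : Int) : Int :=
  find_space_go disk size (PySem.List.pyRange 0 limit 1) 0

-- ===== PORT B =====
-- B's backward for-loop 'for i in range(len(pfx)-1, -1, -1)': the Nat argument is the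
-- number of indices still to process, so the call on i+1 handles index i and recurses on i,
-- visiting len-1, len-2, …, 0 exactly as range does.  pfx.getD i 0 is exact here:
-- i is always in range (0 ≤ i < pfx.length).
def find_space_alt_go (pfx : List Int) (size : Int) : Nat → Int × Int → Int × Int
  | 0, st => st
  | i+1, st =>
    let v := pfx.getD i 0
    let run := if v < 0 then st.2 + 1 else 0
    let best := if v < 0 ∧ run ≥ size then (i : Int) else st.1
    find_space_alt_go pfx size i (best, run)

def find_space_alt (disk : List Int) (size : Int) (limit : Int) : Int :=
  let pfx := PySem.List.slice disk none (some (max limit 0))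
  (find_space_alt_go pfx size pfx.length (-1, 0)).1

-- ===== PRECONDITION & SPEC =====
-- Pre_ excludes exactly the inputs where Python A raises IndexError: limit > len(disk) and
-- no free run of length max(size,1) exists inside disk (so A's scan reaches index len(disk)).
def Pre_find_space (disk : List Int) (size : Int) (limit : Int) : Prop :=
  limit ≤ disk.length ∨
    ∃ j ∈ List.range disk.length,
      j + (max size 1).toNat ≤ disk.length ∧
      ∀ k ∈ List.range (max size 1).toNat, disk.getD (j + k) 0 < 0
instance (disk : List Int) (size : Int) (limit : Int) : Decidable (Pre_find_space disk size limit) := by unfold Pre_find_space; infer_instance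

def pvWitness_find_space : List Int × Int × Int := ([1, -1, -1, 0], 2, 4)

def Spec_find_space (disk : List Int) (size : Int) (limit : Int) (out : Int) : Prop := out = find_space_alt disk size limit
instance (disk : List Int) (size : Int) (limit : Int) (out : Int) : Decidable (Spec_find_space disk size limit out) := by unfold Spec_find_space; infer_instance

-- ===== CLAIM (what is proved, stated in full; the proofs are below) =====
def Claim_equal_find_space : Prop := ∀ (disk : List Int) (size : Int) (limit : Int), Dom_find_space disk size limit → Pre_find_space disk size limit → Spec_find_space disk size limit (find_space disk size limit)

-- ===== LEMMAS AND PROOFS =====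

-- Length of the free run starting at index i of p (0 past the end or at an occupied cell).
def runAt (p : List Int) (i : Nat) : Nat :=
  if _h : i < p.length then (if p.getD i 0 < 0 then runAt p (i + 1) + 1 else 0) else 0
termination_by p.length - i
decreasing_by omega

-- Leftmost j ≥ i whose cell is free and whose run reaches size, else -1: B's loop invariant.
def bestAt (p : List Int) (size : Int) (i : Nat) : Int :=
  if _h : i < p.length then
    (if p.getD i 0 < 0 ∧ size ≤ (runAt p i : Int) then (i : Int) else bestAt p size (i + 1))
  else -1
termination_by p.length - i
decreasing_by omega

lemma runAt_le_length (p : List Int) (i : Nat) : runAt p i ≤ p.length - i := by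
  rw [runAt]
  split_ifs with h1 h2
  · have := runAt_le_length p (i + 1); omega
  · omega
  · omega
termination_by p.length - i
decreasing_by omega

lemma runAt_le_of_occupied (p : List Int) (m : Nat) (hm : 0 ≤ p.getD m 0) :
    ∀ j : Nat, j ≤ m → runAt p j ≤ m - j := by
  intro j hj
  rcases Nat.lt_or_ge j m with hlt | hge
  · rw [runAt]
    split_ifs with h1 h2
    · have := runAt_le_of_occupied p m hm (j + 1) (by omega); omega
    · omega
    · omega
  · have hjm : j = m := by omega
    subst hjm
    rw [runAt]
    split_ifs with h1 h2
    · omega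
    · omega
    · omega
termination_by j => m - j
decreasing_by omega

lemma runAt_ge_of_free (p : List Int) :
    ∀ (t i : Nat), i + t ≤ p.length → (∀ k, k < t → p.getD (i + k) 0 < 0) → t ≤ runAt p i := by
  intro t
  induction t with
  | zero => intro i _ _; omega
  | succ t ih =>
    intro i hlen hfree
    rw [runAt]
    have h0 : p.getD i 0 < 0 := by simpa using hfree 0 (by omega)
    rw [dif_pos (by omega), if_pos h0]
    have ht := ih (i + 1) (by omega) (fun k hk => by
      have h1 : i + 1 + k = i + (k + 1) := by omega
      rw [h1]; exact hfree (k + 1) (by omega))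
    omega

lemma bestAt_neg_iff (p : List Int) (size : Int) (i : Nat) :
    bestAt p size i = -1 ↔
      ∀ j, i ≤ j → j < p.length → ¬(p.getD j 0 < 0 ∧ size ≤ (runAt p j : Int)) := by
  rw [bestAt]
  split_ifs with h1 h2
  · constructor
    · intro h; exfalso; omega
    · intro h; exact absurd h2 (h i (le_refl i) h1)
  · rw [bestAt_neg_iff p size (i + 1)]
    constructor
    · intro h j hj hjl hq
      rcases Nat.eq_or_lt_of_le hj with rfl | hlt
      · exact h2 hq
      · exact h j hlt hjl hq
    · intro h j hj hjl hq
      exact h j (by omega) hjl hq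
  · constructor
    · intro _ j _ hjl _; omega
    · intro _; rfl
termination_by p.length - i
decreasing_by omega

lemma bestAt_of_qual (p : List Int) (size : Int) (i : Nat) (h1 : i < p.length)
    (h2 : p.getD i 0 < 0) (h3 : size ≤ (runAt p i : Int)) : bestAt p size i = (i : Int) := by
  rw [bestAt, dif_pos h1, if_pos ⟨h2, h3⟩]

lemma bestAt_congr (p : List Int) (size : Int) :
    ∀ (i i' : Nat), i ≤ i' →
      (∀ j, i ≤ j → j < i' → ¬(p.getD j 0 < 0 ∧ size ≤ (runAt p j : Int))) →
      bestAt p size i = bestAt p size i' := by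
  intro i i' hle hno
  rcases Nat.eq_or_lt_of_le hle with rfl | hlt
  · rfl
  · have step : bestAt p size i = bestAt p size (i + 1) := by
      rw [bestAt]
      split_ifs with h1 h2
      · exact absurd h2 (hno i (le_refl i) hlt)
      · rfl
      · symm; rw [bestAt_neg_iff]
        intro j hj hjl _; omega
    rw [step]
    exact bestAt_congr p size (i + 1) i' (by omega) (by intro j hj hjl; exact hno j (by omega) hjl)
termination_by i i' => i' - i
decreasing_by omega

lemma getD_take_eq (xs : List Int) (m j : Nat) (h : j < (xs.take m).length) :
    (xs.take m).getD j 0 = xs.getD j 0 := by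
  have hj : j < xs.length := by simp [List.length_take] at h; omega
  rw [List.getD_eq_getElem _ _ h, List.getD_eq_getElem _ _ hj]
  exact List.getElem_take

-- B's loop computes bestAt: processing index i turns the state correct for suffix i+1
-- into the state correct for suffix i.
lemma alt_go_eq (p : List Int) (size : Int) :
    ∀ i : Nat, i ≤ p.length →
      find_space_alt_go p size i (bestAt p size i, (runAt p i : Int)) =
        (bestAt p size 0, (runAt p 0 : Int)) := by
  intro i
  induction i with
  | zero => intro _; rfl
  | succ i ih =>
    intro h
    have hi : i < p.length := by omega
    have hrun : (if p.getD i 0 < 0 then ((runAt p (i + 1) : Int)) + 1 else 0) = (runAt p i : Int) := by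
      conv_rhs => rw [runAt]
      rw [dif_pos hi]
      split_ifs with hv
      · push_cast; ring
      · rfl
    have hbest :
        (if p.getD i 0 < 0 ∧ (runAt p i : Int) ≥ size then (i : Int) else bestAt p size (i + 1))
          = bestAt p size i := by
      conv_rhs => rw [bestAt]
      rw [dif_pos hi]
    show find_space_alt_go p size i _ = _
    rw [hrun, hbest]
    exact ih (by omega)

lemma alt_eq_bestAt (disk : List Int) (size limit : Int) (hl : 0 ≤ limit) :
    find_space_alt disk size limit = bestAt (disk.take limit.toNat) size 0 := by
  unfold find_space_alt
  have hmax : max limit 0 = ((limit.toNat : Nat) : Int) := by omega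
  rw [hmax, PySem.List.slice_to_natCast]
  have := alt_go_eq (disk.take limit.toNat) size (disk.take limit.toNat).length (le_refl _)
  have hb : bestAt (disk.take limit.toNat) size (disk.take limit.toNat).length = -1 := by
    rw [bestAt, dif_neg (by omega)]
  have hr : runAt (disk.take limit.toNat) (disk.take limit.toNat).length = 0 := by
    rw [runAt, dif_neg (by omega)]
  rw [hb, hr] at this
  simpa using congrArg Prod.fst this

-- No qualifying start at or after position i - c when the scan has run off the pfx:
-- every run from there fits inside the ≤ c remaining free cells.
lemma no_qual_tail (p : List Int) (size c i : Int) (h0 : 0 ≤ c) (hci : c ≤ i)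
    (hn : (p.length : Int) ≤ i) (hc : c < size ∨ c = 0) :
    bestAt p size (i - c).toNat = -1 := by
  rw [bestAt_neg_iff]
  intro j hj hjl hq
  have hrun := runAt_le_length p j
  rcases hc with hc | hc
  · have : (runAt p j : Int) ≤ c := by omega
    omega
  · omega

-- A's forward scan from position i with counter c (the c cells before i are free and
-- c has not reached size) returns the leftmost qualifying start ≥ i - c of the pfx,
-- provided the scan cannot run off the disk (the safety disjunct).
lemma go_eq_bestAt (disk : List Int) (size limit : Int) (hl : 0 ≤ limit) :
    ∀ (fuel : Nat) (i c : Int), (limit - i).toNat ≤ fuel →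
      0 ≤ c → c ≤ i → i ≤ limit →
      (∀ j : Nat, i - c ≤ (j : Int) → (j : Int) < i → disk.getD j 0 < 0) →
      (c < size ∨ c = 0) →
      ((limit : Int) ≤ disk.length ∨ bestAt (disk.take limit.toNat) size (i - c).toNat ≠ -1) →
      find_space_go disk size (PySem.List.pyRange i limit 1) c =
        bestAt (disk.take limit.toNat) size (i - c).toNat := by
  intro fuel
  set p := disk.take limit.toNat with hp
  have hplen : (p.length : Int) = min limit (disk.length : Int) := by
    rw [hp]; simp [List.length_take]; omega
  have hpd : ∀ j : Nat, j < p.length → p.getD j 0 = disk.getD j 0 := by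
    intro j hj; exact getD_take_eq disk limit.toNat j hj
  induction fuel with
  | zero =>
    intro i c hfuel h0 hci hil hfree hc hsafe
    have hieq : i = limit := by omega
    subst hieq
    rw [PySem.List.pyRange_one_eq_nil (le_refl _)]
    show (-1 : Int) = _
    exact (no_qual_tail p size c i h0 hci (by omega) hc).symm
  | succ fuel ih =>
    intro i c hfuel h0 hci hil hfree hc hsafe
    rcases Int.lt_or_le i limit with hilt | hige
    swap
    · have hieq : i = limit := by omega
      subst hieq
      rw [PySem.List.pyRange_one_eq_nil (le_refl _)]
      show (-1 : Int) = _
      exact (no_qual_tail p size c i h0 hci (by omega) hc).symm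
    rw [PySem.List.pyRange_one_cons hilt]
    show (match PySem.List.pyGet? disk i with
      | none => 0
      | some v =>
        if v ≥ 0 then find_space_go disk size (PySem.List.pyRange (i+1) limit 1) 0
        else
          let f := c + 1
          if f ≥ size then i + 1 - f
          else find_space_go disk size (PySem.List.pyRange (i+1) limit 1) f) = _
    cases hget : PySem.List.pyGet? disk i with
    | none =>
      -- IndexError state: excluded by the safety disjunct.
      exfalso
      rw [PySem.List.pyGet?_of_nonneg disk (by omega : (0:Int) ≤ i)] at hget
      have hlen : (disk.length : Int) ≤ i := by
        have := List.getElem?_eq_none_iff.mp hget; omega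
      rcases hsafe with hs | hs
      · omega
      · exact hs (no_qual_tail p size c i h0 hci (by omega) hc)
    | some v =>
      rw [PySem.List.pyGet?_of_nonneg disk (by omega : (0:Int) ≤ i)] at hget
      obtain ⟨hilt2, hveq⟩ := List.getElem?_eq_some_iff.mp hget
      have hvin : 0 ≤ i ∧ i < (disk.length : Int) := by
        constructor <;> omega
      have hvd : v = disk.getD i.toNat 0 := by
        rw [List.getD_eq_getElem _ _ hilt2]; exact hveq.symm
      have hiplen : (i.toNat : Int) < (p.length : Int) := by omega
      dsimp only
      by_cases hv : v ≥ 0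
      · rw [if_pos hv]
        -- no qualifying start in [i-c, i+1): runs from there end at the occupied cell i
        have hnoq : ∀ j, (i - c).toNat ≤ j → j < (i + 1).toNat →
            ¬(p.getD j 0 < 0 ∧ size ≤ (runAt p j : Int)) := by
          intro j hj1 hj2 hq
          rcases Nat.lt_or_ge j i.toNat with hji | hji
          · have hocc : 0 ≤ p.getD i.toNat 0 := by
              rw [hpd i.toNat (by omega)]; omega
            have := runAt_le_of_occupied p i.toNat hocc j (by omega)
            rcases hc with hc | hc
            · have : (runAt p j : Int) ≤ c := by omega
              omega
            · omega
          · have hji2 : j = i.toNat := by omega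
            subst hji2
            rw [hpd _ (by omega)] at hq
            omega
        have hcongr : bestAt p size (i - c).toNat = bestAt p size (i + 1).toNat :=
          bestAt_congr p size _ _ (by omega) hnoq
        rw [hcongr]
        have hstep := ih (i + 1) 0 (by omega) (by omega) (by omega) (by omega)
          (by intro j hj1 hj2; omega)
          (Or.inr rfl)
          (by
            rcases hsafe with hs | hs
            · exact Or.inl hs
            · right
              rw [show i + 1 - 0 = i + 1 by ring]
              rw [← hcongr]; exact hs)
        rw [show i + 1 - 0 = i + 1 by ring] at hstep
        exact hstep
      · rw [if_neg hv]
        by_cases hf : c + 1 ≥ size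
        · rw [if_pos hf]
          -- return: the run starting at i - c reaches size
          have hm : (i - c).toNat < p.length := by omega
          have hfree' : p.getD (i - c).toNat 0 < 0 := by
            rw [hpd _ hm]
            rcases Int.lt_or_le (i - c) i with hlt | hge
            · have := hfree (i - c).toNat (by omega) (by omega)
              omega
            · have : (i - c).toNat = i.toNat := by omega
              rw [this]; omega
          have hrun : size ≤ (runAt p (i - c).toNat : Int) := by
            have := runAt_ge_of_free p (c.toNat + 1) (i - c).toNat
              (by omega)
              (by
                intro k hk
                rw [hpd _ (by omega)]
                rcases Nat.lt_or_ge k c.toNat with hkc | hkc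
                · have := hfree ((i - c).toNat + k) (by omega) (by omega)
                  omega
                · have : (i - c).toNat + k = i.toNat := by omega
                  rw [this]; omega)
            omega
          rw [bestAt_of_qual p size _ hm hfree' hrun]
          omega
        · rw [if_neg hf]
          have hstep := ih (i + 1) (c + 1) (by omega) (by omega) (by omega) (by omega)
            (by
              intro j hj1 hj2
              rcases Int.lt_or_le (j : Int) i with hlt | hge
              · exact hfree j (by omega) hlt
              · have : (j : Int) = i := by omega
                have hji : j = i.toNat := by omega
                subst hji
                omega)
            (Or.inl (by omega))
            (by rw [show i + 1 - (c + 1) = i - c by ring]; exact hsafe)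
          rw [show i + 1 - (c + 1) = i - c by ring] at hstep
          exact hstep

lemma ports_agree (disk : List Int) (size limit : Int) (hpre : Pre_find_space disk size limit) :
    find_space disk size limit = find_space_alt disk size limit := by
  rcases Int.lt_or_le limit 0 with hneg | hl
  · unfold find_space find_space_alt
    rw [PySem.List.pyRange_one_eq_nil (by omega)]
    have hmax : max limit 0 = ((0 : Nat) : Int) := by omega
    rw [hmax, PySem.List.slice_to_natCast]
    simp [find_space_go, find_space_alt_go]
  · rw [alt_eq_bestAt disk size limit hl]
    unfold find_space
    set p := disk.take limit.toNat with hp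
    have hsafe : (limit : Int) ≤ disk.length ∨ bestAt p size 0 ≠ -1 := by
      by_cases hlen : (limit : Int) ≤ disk.length
      · exact Or.inl hlen
      · right
        rcases hpre with h | ⟨j, hjmem, hjlen, hjfree⟩
        · omega
        · rw [List.mem_range] at hjmem
          have hplen : p.length = disk.length := by
            rw [hp]; simp [List.length_take]; omega
          have hs1 : (1 : Nat) ≤ (max size 1).toNat := by omega
          have htl : (List.take limit.toNat disk).length = disk.length := by
            simp [List.length_take]; omega
          intro hcon
          rw [bestAt_neg_iff] at hcon
          refine hcon j (by omega) (by omega) ⟨?_, ?_⟩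
          · rw [getD_take_eq disk limit.toNat j (by omega)]
            have := hjfree 0 (by rw [List.mem_range]; omega)
            simpa using this
          · have hge := runAt_ge_of_free p (max size 1).toNat j
              (by omega)
              (by
                intro k hk
                rw [getD_take_eq disk limit.toNat (j + k) (by omega)]
                exact hjfree k (by rw [List.mem_range]; omega))
            have : size ≤ ((max size 1).toNat : Int) := by omega
            omega
    have := go_eq_bestAt disk size limit hl limit.toNat 0 0 (by omega) (by omega) (by omega) hl
      (by intro j hj1 hj2; omega) (Or.inr rfl)
      (by rw [show (0 : Int) - 0 = 0 by ring]; simpa using hsafe)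
    rw [show (0 : Int) - 0 = 0 by ring] at this
    simpa using this

-- ===== VERDICT (by name: the statement is the Claim_ definition above) =====
theorem find_space_spec : Claim_equal_find_space := by
  intro disk size limit _ hpre
  unfold Spec_find_space
  exact ports_agree disk size limit hpre
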